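-- pv_equiv track=rewrite | github.com/russell-pier/covenant | src/async_world/spiral_generator.py | _generate_layer_offsets
-- ===== SOURCE A (Python) =====
-- from typing import List, Tuple, Set, Iterator
--
-- def _generate_layer_offsets(layer: int) -> List[Tuple[int, int]]:
--     """Generate all offsets for a specific layer of the spiral."""
--     offsets = []
--
--     # Top edge (left to right)
--     for x in range(-layer, layer + 1):
--         offsets.append((x, -layer))
--
--     # Right edge (top to bottom, excluding corners)
--     for y in range(-layer + 1, layer):
--         offsets.append((layer, y))
--
--     # Bottom edge (right to left, excluding right corner)
--     if layer > 0:
--         for x in range(layer, -layer - 1, -1):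
--             offsets.append((x, layer))
--
--     # Left edge (bottom to top, excluding corners)
--     for y in range(layer - 1, -layer, -1):
--         offsets.append((-layer, y))
--
--     return offsets
-- ===== SOURCE B (Python) =====
-- def _generate_layer_offsets(layer):
--     """Generate all offsets for a specific layer of the spiral."""
--     if layer < 0:
--         return []
--     if layer == 0:
--         return [(0, 0)]
--     offsets = []
--     x, y = -layer, -layer
--     for dx, dy in ((1, 0), (0, 1), (-1, 0), (0, -1)):
--         for _ in range(2 * layer):
--             offsets.append((x, y))
--             x += dx
--             y += dy
--     return offsets
-- ===== Notes on version B (the rewrite author's own statement) =====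
-- stated objective: alternative
-- what changed: Replaced the four absolute-coordinate range loops (one per edge, with per-edge corner bookkeeping) by a single incremental perimeter walk: a position-and-direction state machine stepping 2*layer times in each of the four unit directions, with degenerate cases layer<0 and layer==0 handled up front.
import Mathlib
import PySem

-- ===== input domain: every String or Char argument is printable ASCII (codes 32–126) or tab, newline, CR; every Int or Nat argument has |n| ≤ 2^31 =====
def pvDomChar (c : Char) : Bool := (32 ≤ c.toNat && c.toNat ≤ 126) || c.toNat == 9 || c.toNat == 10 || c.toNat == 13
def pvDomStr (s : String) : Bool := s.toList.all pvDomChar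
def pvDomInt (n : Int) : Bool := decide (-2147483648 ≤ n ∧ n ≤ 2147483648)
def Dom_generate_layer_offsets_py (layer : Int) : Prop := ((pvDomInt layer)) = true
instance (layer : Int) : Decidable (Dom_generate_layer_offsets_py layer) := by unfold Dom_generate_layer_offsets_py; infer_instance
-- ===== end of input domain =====

-- B replaces A's four absolute-coordinate range loops by a single position-and-direction
-- perimeter walk over the four unit directions (objective: alternative decomposition).

-- ===== PORT A =====
def generate_layer_offsets_py (layer : Int) : List (Int × Int) :=
  let offsets : List (Int × Int) := []
  -- Top edge (left to right)
  let offsets := (PySem.List.pyRange (-layer) (layer + 1) 1).foldl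
      (fun acc x => acc ++ [(x, -layer)]) offsets
  -- Right edge (top to bottom, excluding corners)
  let offsets := (PySem.List.pyRange (-layer + 1) layer 1).foldl
      (fun acc y => acc ++ [(layer, y)]) offsets
  -- Bottom edge (right to left, excluding right corner)
  let offsets := if layer > 0 then
      (PySem.List.pyRange layer (-layer - 1) (-1)).foldl
        (fun acc x => acc ++ [(x, layer)]) offsets
    else offsets
  -- Left edge (bottom to top, excluding corners)
  (PySem.List.pyRange (layer - 1) (-layer) (-1)).foldl
      (fun acc y => acc ++ [(-layer, y)]) offsets

-- ===== PORT B =====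
def generate_layer_offsets_py_alt (layer : Int) : List (Int × Int) :=
  if layer < 0 then []
  else if layer = 0 then [(0, 0)]
  else
    -- perimeter walk: state = (x, y, offsets); four directions, 2*layer steps each
    (([((1 : Int), (0 : Int)), (0, 1), (-1, 0), (0, -1)]).foldl
      (fun (st : Int × Int × List (Int × Int)) d =>
        (List.range (2 * layer).toNat).foldl
          (fun st _ => (st.1 + d.1, st.2.1 + d.2, st.2.2 ++ [(st.1, st.2.1)])) st)
      (-layer, -layer, [])).2.2

-- ===== PRECONDITION & SPEC =====
def Spec_generate_layer_offsets_py (layer : Int) (out : List (Int × Int)) : Prop := out = generate_layer_offsets_py_alt layer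
instance (layer : Int) (out : List (Int × Int)) : Decidable (Spec_generate_layer_offsets_py layer out) := by unfold Spec_generate_layer_offsets_py; infer_instance

-- ===== CLAIM (what is proved, stated in full; the proofs are below) =====
def Claim_equal_generate_layer_offsets_py : Prop := ∀ (layer : Int), Dom_generate_layer_offsets_py layer → Spec_generate_layer_offsets_py layer (generate_layer_offsets_py layer)

-- ===== LEMMAS AND PROOFS =====

theorem pv_foldl_push {α β : Type} (l : List α) (f : α → β) (init : List β) :
    l.foldl (fun acc x => acc ++ [f x]) init = init ++ l.map f := by
  induction l generalizing init with
  | nil => simp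
  | cons a t ih => simp [List.foldl_cons, ih]

theorem pv_side (dx dy : Int) (n : Nat) (x y : Int) (acc : List (Int × Int)) :
    (List.range n).foldl
      (fun (st : Int × Int × List (Int × Int)) _ =>
        (st.1 + dx, st.2.1 + dy, st.2.2 ++ [(st.1, st.2.1)])) (x, y, acc)
    = (x + n * dx, y + n * dy,
       acc ++ (List.range n).map (fun i : Nat => (x + (i : Int) * dx, y + (i : Int) * dy))) := by
  induction n generalizing x y acc with
  | zero => simp
  | succ n ih =>
    rw [List.range_succ, List.foldl_append, ih]
    simp only [List.foldl_cons, List.foldl_nil]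
    push_cast
    refine Prod.ext (by ring) (Prod.ext (by ring) ?_)
    simp [List.append_assoc]

theorem pv_main (m : Nat) :
    generate_layer_offsets_py ((m : Int) + 1) = generate_layer_offsets_py_alt ((m : Int) + 1) := by
  simp only [generate_layer_offsets_py, generate_layer_offsets_py_alt]
  rw [if_pos (show ((m:Int)+1) > 0 by omega), if_neg (show ¬((m:Int)+1 < 0) by omega), if_neg (show ¬((m:Int)+1 = 0) by omega)]
  rw [PySem.List.pyRange_one, PySem.List.pyRange_one, PySem.List.pyRange_neg_one,
      PySem.List.pyRange_neg_one]
  simp only [List.foldl_cons, List.foldl_nil]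
  rw [pv_side, pv_side, pv_side, pv_side]
  simp only [pv_foldl_push, List.map_map, List.nil_append, Function.comp_def]
  have h1 : ((m : Int) + 1 + 1 - -((m : Int) + 1)).toNat = 2 * m + 3 := by omega
  have h2 : ((m : Int) + 1 - (-((m : Int) + 1) + 1)).toNat = 2 * m + 1 := by omega
  have h3 : ((m : Int) + 1 - (-((m : Int) + 1) - 1)).toNat = 2 * m + 3 := by omega
  have h4 : ((m : Int) + 1 - 1 - -((m : Int) + 1)).toNat = 2 * m + 1 := by omega
  have h5 : (2 * ((m : Int) + 1)).toNat = 2 * m + 2 := by omega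
  rw [h1, h2, h3, h4, h5]
  have A1 : List.map (fun x : Nat => (-((m:Int) + 1) + (x:Int), -((m:Int) + 1))) (List.range (2*m+3))
      = List.map (fun i : Nat => (-((m:Int) + 1) + (i:Int) * 1, -((m:Int) + 1) + (i:Int) * 0)) (List.range (2*m+2))
        ++ [((m:Int) + 1, -((m:Int) + 1))] := by
    rw [(by omega : 2*m+3 = (2*m+2)+1), List.range_succ, List.map_append]
    refine congrArg₂ _ (List.map_congr_left fun k _ => ?_) ?_
    · simp only [Prod.mk.injEq]; constructor <;> omega
    · simp only [List.map_cons, List.map_nil, List.cons.injEq, Prod.mk.injEq, and_true]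
      omega
  have B2 : List.map (fun i : Nat => (-((m:Int) + 1) + ((2*m+2 : Nat):Int) * 1 + (i:Int) * 0,
        -((m:Int) + 1) + ((2*m+2 : Nat):Int) * 0 + (i:Int) * 1)) (List.range (2*m+2))
      = ((m:Int) + 1, -((m:Int) + 1)) ::
        List.map (fun x : Nat => ((m:Int) + 1, -((m:Int) + 1) + 1 + (x:Int))) (List.range (2*m+1)) := by
    rw [(by omega : 2*m+2 = (2*m+1)+1), List.range_succ_eq_map, List.map_cons, List.map_map]
    refine congrArg₂ _ ?_ (List.map_congr_left fun k _ => ?_)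
    · simp only [Prod.mk.injEq]; constructor <;> push_cast <;> omega
    · simp only [Function.comp_apply, Prod.mk.injEq, Nat.succ_eq_add_one]
      constructor <;> push_cast <;> omega
  have A3 : List.map (fun x : Nat => ((m:Int) + 1 - (x:Int), (m:Int) + 1)) (List.range (2*m+3))
      = List.map (fun i : Nat => (-((m:Int) + 1) + ((2*m+2 : Nat):Int) * 1 + ((2*m+2 : Nat):Int) * 0 + (i:Int) * -1,
          -((m:Int) + 1) + ((2*m+2 : Nat):Int) * 0 + ((2*m+2 : Nat):Int) * 1 + (i:Int) * 0)) (List.range (2*m+2))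
        ++ [(-((m:Int) + 1), (m:Int) + 1)] := by
    rw [(by omega : 2*m+3 = (2*m+2)+1), List.range_succ, List.map_append]
    refine congrArg₂ _ (List.map_congr_left fun k _ => ?_) ?_
    · simp only [Prod.mk.injEq]; constructor <;> push_cast <;> omega
    · simp only [List.map_cons, List.map_nil, List.cons.injEq, Prod.mk.injEq, and_true]
      omega
  have B4 : List.map (fun i : Nat => (-((m:Int) + 1) + ((2*m+2 : Nat):Int) * 1 + ((2*m+2 : Nat):Int) * 0 + ((2*m+2 : Nat):Int) * -1 + (i:Int) * 0,
        -((m:Int) + 1) + ((2*m+2 : Nat):Int) * 0 + ((2*m+2 : Nat):Int) * 1 + ((2*m+2 : Nat):Int) * 0 + (i:Int) * -1)) (List.range (2*m+2))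
      = (-((m:Int) + 1), (m:Int) + 1) ::
        List.map (fun x : Nat => (-((m:Int) + 1), (m:Int) + 1 - 1 - (x:Int))) (List.range (2*m+1)) := by
    rw [(by omega : 2*m+2 = (2*m+1)+1), List.range_succ_eq_map, List.map_cons, List.map_map]
    refine congrArg₂ _ ?_ (List.map_congr_left fun k _ => ?_)
    · simp only [Prod.mk.injEq]; constructor <;> push_cast <;> omega
    · simp only [Function.comp_apply, Prod.mk.injEq, Nat.succ_eq_add_one]
      constructor <;> push_cast <;> omega
  rw [A1, B2, A3, B4]
  simp [List.append_assoc]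

theorem pv_neg (layer : Int) (h : layer < 0) :
    generate_layer_offsets_py layer = generate_layer_offsets_py_alt layer := by
  simp only [generate_layer_offsets_py, generate_layer_offsets_py_alt]
  rw [if_pos h, if_neg (show ¬ layer > 0 by omega),
      PySem.List.pyRange_one_eq_nil (show layer + 1 ≤ -layer by omega),
      PySem.List.pyRange_one_eq_nil (show layer ≤ -layer + 1 by omega),
      PySem.List.pyRange_neg_one_eq_nil (show layer - 1 ≤ -layer by omega)]
  simp

-- ===== VERDICT (by name: the statement is the Claim_ definition above) =====
theorem generate_layer_offsets_py_spec : Claim_equal_generate_layer_offsets_py := by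
  intro layer _
  unfold Spec_generate_layer_offsets_py
  rcases lt_trichotomy layer 0 with h | h | h
  · exact pv_neg layer h
  · subst h; decide
  · obtain ⟨m, rfl⟩ : ∃ m : Nat, layer = (m : Int) + 1 := ⟨(layer - 1).toNat, by omega⟩
    exact pv_main m
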